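-- pv_equiv track=rewrite | github.com/DaredevilSlim/Python | Checkio/List_but_not_the_least/stock_profit.py | stock_profit
-- ===== SOURCE A (Python) =====
-- def stock_profit(stock: list[int]) -> int:
--     a = stock.index(min(stock))
--     b = stock.index(max(stock))
--     if len(stock) > 1:
--         if b < a:
--             return stock_profit(stock[:a] if len(stock) - 1 == a else stock[b + 1:])
--         return stock[b] - stock[a]
--     return 0
-- ===== SOURCE B (Python) =====
-- def stock_profit(stock: list[int]) -> int:
--     # Iterative: keep a window [lo, hi) into the original list; one combined pass
--     # per round finds the first argmin and first argmax, then shrink the window.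
--     lo, hi = 0, len(stock)
--     while hi - lo > 1:
--         ai = bi = lo
--         for i in range(lo + 1, hi):
--             if stock[i] < stock[ai]:
--                 ai = i
--             if stock[i] > stock[bi]:
--                 bi = i
--         if ai <= bi:
--             return stock[bi] - stock[ai]
--         if ai == hi - 1:
--             hi = ai
--         else:
--             lo = bi + 1
--     return 0
-- ===== Notes on version B (the rewrite author's own statement) =====
-- stated objective: alternative
-- what changed: Replaced A's recursion on freshly-built list slices with four scans per round (min, max, two .index calls) by an iterative [lo,hi) index window over the original list with a single combined pass per round that finds the first argmin and argmax together.
-- outside the precondition, e.g. on stock_profit([]): A raises ValueError, B returns 0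
import Mathlib
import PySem

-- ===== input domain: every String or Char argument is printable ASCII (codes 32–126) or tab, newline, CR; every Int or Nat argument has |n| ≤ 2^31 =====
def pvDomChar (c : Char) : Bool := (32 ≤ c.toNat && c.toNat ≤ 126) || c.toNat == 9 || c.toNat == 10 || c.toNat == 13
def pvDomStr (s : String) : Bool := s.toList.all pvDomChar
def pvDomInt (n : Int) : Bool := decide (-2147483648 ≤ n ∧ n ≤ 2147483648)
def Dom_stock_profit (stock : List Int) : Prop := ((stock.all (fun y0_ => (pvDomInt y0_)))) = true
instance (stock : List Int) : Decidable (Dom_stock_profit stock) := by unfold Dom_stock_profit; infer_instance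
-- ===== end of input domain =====

-- B replaces A's recursion-with-slicing (and its four scans per round: min, max, two .index)
-- by an iterative [lo,hi) window over the original list with ONE combined scan per round
-- ('alternative' decomposition; same worst-case asymptotics).

-- ===== PORT A =====
-- Literal transliteration of A: min/max + .index, recursion on slices.
def stock_profit (stock : List Int) : Int :=
  let a := (PySem.List.index? stock ((PySem.List.min? stock (fun x => x)).getD 0)).getD 0
  let b := (PySem.List.index? stock ((PySem.List.max? stock (fun x => x)).getD 0)).getD 0
  if stock.length > 1 then
    if b < a then
      stock_profit (if stock.length - 1 = a
        then PySem.List.slice stock none (some (a : Int))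
        else PySem.List.slice stock (some ((b : Int) + 1)) none)
    else PySem.List.pyGetD stock (b : Int) 0 - PySem.List.pyGetD stock (a : Int) 0
  else 0
termination_by stock.length
decreasing_by
  split
  · rw [PySem.List.slice_to_natCast]
    simp only [List.length_take]
    omega
  · have : ((b : Int) + 1) = ((b + 1 : Nat) : Int) := by push_cast; ring
    rw [this, PySem.List.slice_from_natCast]
    simp only [List.length_drop]
    omega

-- ===== PORT B =====
-- Source B's inner for-loop: one pass over indices lo+1..hi-1 maintaining (ai, bi).
def pvScan (stock : List Int) (lo hi : Nat) : Nat × Nat :=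
  (PySem.List.pyRange ((lo : Int) + 1) (hi : Int) 1).foldl
    (fun ab i =>
      let ai := if PySem.List.pyGetD stock i 0 < PySem.List.pyGetD stock (ab.1 : Int) 0 then i.toNat else ab.1
      let bi := if PySem.List.pyGetD stock i 0 > PySem.List.pyGetD stock (ab.2 : Int) 0 then i.toNat else ab.2
      (ai, bi))
    (lo, lo)

-- bounds of the scan result (cited by pvLoop's decreasing_by)
theorem pvScan_bounds (stock : List Int) (lo hi : Nat) (h : lo < hi) :
    lo ≤ (pvScan stock lo hi).1 ∧ (pvScan stock lo hi).1 < hi ∧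
    lo ≤ (pvScan stock lo hi).2 ∧ (pvScan stock lo hi).2 < hi := by
  unfold pvScan
  have hmem : ∀ i ∈ PySem.List.pyRange ((lo : Int) + 1) (hi : Int) 1,
      (lo : Int) + 1 ≤ i ∧ i < (hi : Int) := fun i hi' => PySem.List.mem_pyRange_one.mp hi'
  generalize hL : PySem.List.pyRange ((lo : Int) + 1) (hi : Int) 1 = L at hmem ⊢
  clear hL
  suffices H : ∀ (L : List Int) (ab : Nat × Nat),
      (∀ i ∈ L, (lo : Int) + 1 ≤ i ∧ i < (hi : Int)) →
      lo ≤ ab.1 → ab.1 < hi → lo ≤ ab.2 → ab.2 < hi →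
      lo ≤ (L.foldl (fun ab i =>
        let ai := if PySem.List.pyGetD stock i 0 < PySem.List.pyGetD stock (ab.1 : Int) 0 then i.toNat else ab.1
        let bi := if PySem.List.pyGetD stock i 0 > PySem.List.pyGetD stock (ab.2 : Int) 0 then i.toNat else ab.2
        (ai, bi)) ab).1 ∧
      (L.foldl (fun ab i =>
        let ai := if PySem.List.pyGetD stock i 0 < PySem.List.pyGetD stock (ab.1 : Int) 0 then i.toNat else ab.1
        let bi := if PySem.List.pyGetD stock i 0 > PySem.List.pyGetD stock (ab.2 : Int) 0 then i.toNat else ab.2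
        (ai, bi)) ab).1 < hi ∧
      lo ≤ (L.foldl (fun ab i =>
        let ai := if PySem.List.pyGetD stock i 0 < PySem.List.pyGetD stock (ab.1 : Int) 0 then i.toNat else ab.1
        let bi := if PySem.List.pyGetD stock i 0 > PySem.List.pyGetD stock (ab.2 : Int) 0 then i.toNat else ab.2
        (ai, bi)) ab).2 ∧
      (L.foldl (fun ab i =>
        let ai := if PySem.List.pyGetD stock i 0 < PySem.List.pyGetD stock (ab.1 : Int) 0 then i.toNat else ab.1
        let bi := if PySem.List.pyGetD stock i 0 > PySem.List.pyGetD stock (ab.2 : Int) 0 then i.toNat else ab.2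
        (ai, bi)) ab).2 < hi by
    exact H L (lo, lo) hmem (le_refl _) h (le_refl _) h
  intro L
  induction L with
  | nil => intro ab _ h1 h2 h3 h4; exact ⟨h1, h2, h3, h4⟩
  | cons x t ih =>
    intro ab hm h1 h2 h3 h4
    simp only [List.foldl_cons]
    have hx := hm x (List.mem_cons_self)
    refine ih _ (fun i hi' => hm i (List.mem_cons_of_mem _ hi')) ?_ ?_ ?_ ?_ <;>
      simp only [] <;> split_ifs <;> omega

-- Source B's while-loop: shrink the window [lo, hi) until one pass settles it.
def pvLoop (stock : List Int) (lo hi : Nat) : Int :=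
  if h : hi - lo > 1 then
    let ab := pvScan stock lo hi
    if ab.1 ≤ ab.2 then
      PySem.List.pyGetD stock (ab.2 : Int) 0 - PySem.List.pyGetD stock (ab.1 : Int) 0
    else if hA : ab.1 = hi - 1 then
      pvLoop stock lo ab.1
    else
      pvLoop stock (ab.2 + 1) hi
  else 0
termination_by hi - lo
decreasing_by
  · have hab : (pvScan stock lo hi).1 = ab.1 := rfl
    omega
  · have hab : (pvScan stock lo hi).2 = ab.2 := rfl
    have := pvScan_bounds stock lo hi (by omega)
    omega

def stock_profit_alt (stock : List Int) : Int :=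
  pvLoop stock 0 stock.length

-- ===== PRECONDITION & SPEC =====
-- Python A raises ValueError (min of empty sequence) on []; that single input is excluded.
def Pre_stock_profit (stock : List Int) : Prop := stock ≠ []
instance (stock : List Int) : Decidable (Pre_stock_profit stock) := by unfold Pre_stock_profit; infer_instance
def pvWitness_stock_profit : List Int := [3, 1, 4]

def Spec_stock_profit (stock : List Int) (out : Int) : Prop := out = stock_profit_alt stock
instance (stock : List Int) (out : Int) : Decidable (Spec_stock_profit stock out) := by unfold Spec_stock_profit; infer_instance

-- ===== CLAIM (what is proved, stated in full; the proofs are below) =====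
def Claim_equal_stock_profit : Prop := ∀ (stock : List Int), Dom_stock_profit stock → Pre_stock_profit stock → Spec_stock_profit stock (stock_profit stock)

-- ===== LEMMAS AND PROOFS =====

-- k is the first index of the minimum / maximum of w
def FirstMin (w : List Int) (k : Nat) : Prop :=
  ∃ h : k < w.length, (∀ x ∈ w, w[k] ≤ x) ∧ ∀ j (hj : j < w.length), j < k → w[k] < w[j]

def FirstMax (w : List Int) (k : Nat) : Prop :=
  ∃ h : k < w.length, (∀ x ∈ w, x ≤ w[k]) ∧ ∀ j (hj : j < w.length), j < k → w[j] < w[k]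

theorem firstMin_of_length_one {w : List Int} (h : w.length = 1) : FirstMin w 0 := by
  obtain ⟨a, rfl⟩ := List.length_eq_one_iff.mp h
  exact ⟨by simp, by simp, by simp⟩

theorem firstMax_of_length_one {w : List Int} (h : w.length = 1) : FirstMax w 0 := by
  obtain ⟨a, rfl⟩ := List.length_eq_one_iff.mp h
  exact ⟨by simp, by simp, by simp⟩

theorem firstMin_append (w : List Int) (x : Int) (k : Nat) (hk : k < w.length)
    (h : FirstMin w k) :
    FirstMin (w ++ [x]) (if x < w[k] then w.length else k) := by
  obtain ⟨hk', hmin, hfst⟩ := h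
  split_ifs with hx
  · refine ⟨by simp, ?_, ?_⟩
    · intro y hy
      rw [List.getElem_concat_length rfl]
      rcases List.mem_append.mp hy with hy | hy
      · exact le_of_lt (lt_of_lt_of_le hx (hmin y hy))
      · simp at hy; omega
    · intro j hj hjlt
      rw [List.getElem_concat_length rfl, List.getElem_append_left (by omega)]
      exact lt_of_lt_of_le hx (hmin _ (List.getElem_mem _))
  · refine ⟨by simp; omega, ?_, ?_⟩
    · intro y hy
      rw [List.getElem_append_left hk]
      rcases List.mem_append.mp hy with hy | hy
      · exact hmin y hy
      · simp at hy; omega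
    · intro j hj hjlt
      rw [List.getElem_append_left hk, List.getElem_append_left (by omega)]
      exact hfst j (by omega) hjlt

theorem firstMax_append (w : List Int) (x : Int) (k : Nat) (hk : k < w.length)
    (h : FirstMax w k) :
    FirstMax (w ++ [x]) (if x > w[k] then w.length else k) := by
  obtain ⟨hk', hmax, hfst⟩ := h
  split_ifs with hx
  · refine ⟨by simp, ?_, ?_⟩
    · intro y hy
      rw [List.getElem_concat_length rfl]
      rcases List.mem_append.mp hy with hy | hy
      · exact le_of_lt (lt_of_le_of_lt (hmax y hy) hx)
      · simp at hy; omega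
    · intro j hj hjlt
      rw [List.getElem_concat_length rfl, List.getElem_append_left (by omega)]
      exact lt_of_le_of_lt (hmax _ (List.getElem_mem _)) hx
  · refine ⟨by simp; omega, ?_, ?_⟩
    · intro y hy
      rw [List.getElem_append_left hk]
      rcases List.mem_append.mp hy with hy | hy
      · exact hmax y hy
      · simp at hy; omega
    · intro j hj hjlt
      rw [List.getElem_append_left hk, List.getElem_append_left (by omega)]
      exact hfst j (by omega) hjlt

theorem firstMin_unique {w : List Int} {k k' : Nat} (h : FirstMin w k) (h' : FirstMin w k') : k = k' := by
  obtain ⟨hk, hmin, hfst⟩ := h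
  obtain ⟨hk', hmin', hfst'⟩ := h'
  by_contra hne
  rcases Nat.lt_or_ge k k' with hlt | hge
  · exact absurd (hmin w[k'] (List.getElem_mem _)) (not_le.mpr (hfst' k hk hlt))
  · exact absurd (hmin' w[k] (List.getElem_mem _)) (not_le.mpr (hfst k' hk' (by omega)))

theorem firstMax_unique {w : List Int} {k k' : Nat} (h : FirstMax w k) (h' : FirstMax w k') : k = k' := by
  obtain ⟨hk, hmax, hfst⟩ := h
  obtain ⟨hk', hmax', hfst'⟩ := h'
  by_contra hne
  rcases Nat.lt_or_ge k k' with hlt | hge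
  · exact absurd (hmax w[k'] (List.getElem_mem _)) (not_le.mpr (hfst' k hk hlt))
  · exact absurd (hmax' w[k] (List.getElem_mem _)) (not_le.mpr (hfst k' hk' (by omega)))

-- A's `.index(min(...))` / `.index(max(...))` land on the first argmin / argmax
theorem aIdx_firstMin {w : List Int} (hw : w ≠ []) :
    FirstMin w ((PySem.List.index? w ((PySem.List.min? w (fun x => x)).getD 0)).getD 0) := by
  obtain ⟨m, hm⟩ : ∃ m, PySem.List.min? w (fun x => x) = some m := by
    cases hmin : PySem.List.min? w (fun x => x) with
    | none => exact absurd ((PySem.List.min?_eq_none_iff w _).mp hmin) hw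
    | some m => exact ⟨m, rfl⟩
  rw [hm]
  have hmem : m ∈ w := PySem.List.min?_mem hm
  have hle : ∀ y ∈ w, m ≤ y := PySem.List.min?_isMin hm
  simp only [Option.getD_some]
  obtain ⟨k, hk⟩ : ∃ k, PySem.List.index? w m = some k :=
    Option.isSome_iff_exists.mp ((PySem.List.index?_isSome_iff w m).mpr hmem)
  rw [hk]
  obtain ⟨hklt, hwk, hne⟩ := PySem.List.getElem_of_index?_eq_some hk
  refine ⟨hklt, fun x hx => hwk ▸ hle x hx, fun j hj hjk => ?_⟩
  have h1 : m ≤ w[j] := hle _ (List.getElem_mem _)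
  have h2 : w[j] ≠ m := hne j hjk
  simp only [Option.getD_some, hwk]
  omega

theorem aIdx_firstMax {w : List Int} (hw : w ≠ []) :
    FirstMax w ((PySem.List.index? w ((PySem.List.max? w (fun x => x)).getD 0)).getD 0) := by
  obtain ⟨m, hm⟩ : ∃ m, PySem.List.max? w (fun x => x) = some m := by
    cases hmax : PySem.List.max? w (fun x => x) with
    | none => exact absurd ((PySem.List.max?_eq_none_iff w _).mp hmax) hw
    | some m => exact ⟨m, rfl⟩
  rw [hm]
  have hmem : m ∈ w := PySem.List.max?_mem hm
  have hle : ∀ y ∈ w, y ≤ m := PySem.List.max?_isMax hm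
  simp only [Option.getD_some]
  obtain ⟨k, hk⟩ : ∃ k, PySem.List.index? w m = some k :=
    Option.isSome_iff_exists.mp ((PySem.List.index?_isSome_iff w m).mpr hmem)
  rw [hk]
  obtain ⟨hklt, hwk, hne⟩ := PySem.List.getElem_of_index?_eq_some hk
  refine ⟨hklt, fun x hx => hwk ▸ hle x hx, fun j hj hjk => ?_⟩
  have h1 : w[j] ≤ m := hle _ (List.getElem_mem _)
  have h2 : w[j] ≠ m := hne j hjk
  simp only [Option.getD_some, hwk]
  omega

-- facts about the window (stock.drop lo).take (hi - lo)
theorem wlen (stock : List Int) (lo hi : Nat) (hhi : hi ≤ stock.length) :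
    ((stock.drop lo).take (hi - lo)).length = hi - lo := by
  simp [List.length_take, List.length_drop]; omega

theorem wget (stock : List Int) (lo hi k : Nat) (hk : k < hi - lo) (hhi : hi ≤ stock.length) :
    ((stock.drop lo).take (hi - lo))[k]'(by rw [wlen stock lo hi hhi]; omega) =
      stock[lo + k]'(by omega) := by
  rw [List.getElem_take, List.getElem_drop]

theorem wget' (stock : List Int) (lo hi m : Nat) (h1 : lo ≤ m) (h2 : m < hi) (hhi : hi ≤ stock.length) :
    ((stock.drop lo).take (hi - lo))[m - lo]'(by rw [wlen stock lo hi hhi]; omega) =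
      stock[m]'(by omega) := by
  rw [wget stock lo hi (m - lo) (by omega) hhi]
  exact getElem_congr rfl (by omega) (by omega)

theorem w_succ (stock : List Int) (lo hi : Nat) (hlo : lo ≤ hi) (hhi : hi < stock.length) :
    (stock.drop lo).take (hi + 1 - lo) =
      (stock.drop lo).take (hi - lo) ++ [stock[hi]] := by
  have : hi + 1 - lo = (hi - lo) + 1 := by omega
  rw [this, List.take_add_one]
  congr 1
  rw [List.getElem?_drop]
  have : lo + (hi - lo) = hi := by omega
  rw [this, List.getElem?_eq_getElem hhi]
  rfl

-- unfolding the scan: empty range, and one extra index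
theorem pvScan_base (stock : List Int) (lo : Nat) : pvScan stock lo (lo + 1) = (lo, lo) := by
  unfold pvScan
  have hcast : ((lo + 1 : Nat) : Int) = (lo : Int) + 1 := by push_cast; ring
  rw [hcast, PySem.List.pyRange_one_eq_nil (le_refl _), List.foldl_nil]

theorem pvScan_succ (stock : List Int) (lo hi : Nat) (h : lo < hi) :
    pvScan stock lo (hi + 1) =
      (if PySem.List.pyGetD stock (hi : Int) 0 < PySem.List.pyGetD stock ((pvScan stock lo hi).1 : Int) 0
         then hi else (pvScan stock lo hi).1,
       if PySem.List.pyGetD stock (hi : Int) 0 > PySem.List.pyGetD stock ((pvScan stock lo hi).2 : Int) 0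
         then hi else (pvScan stock lo hi).2) := by
  unfold pvScan
  have hcast : ((hi + 1 : Nat) : Int) = (hi : Int) + 1 := by push_cast; ring
  rw [hcast, PySem.List.pyRange_one_succ_right (by exact_mod_cast h), List.foldl_append,
    List.foldl_cons, List.foldl_nil]
  simp only [Int.toNat_natCast]

-- the one pass of B finds the first argmin and first argmax of the window
theorem pvScan_spec (stock : List Int) (lo : Nat) :
    ∀ hi, lo + 1 ≤ hi → hi ≤ stock.length →
    lo ≤ (pvScan stock lo hi).1 ∧ (pvScan stock lo hi).1 < hi ∧
    lo ≤ (pvScan stock lo hi).2 ∧ (pvScan stock lo hi).2 < hi ∧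
    FirstMin ((stock.drop lo).take (hi - lo)) ((pvScan stock lo hi).1 - lo) ∧
    FirstMax ((stock.drop lo).take (hi - lo)) ((pvScan stock lo hi).2 - lo) := by
  intro hi hle
  induction hi, hle using Nat.le_induction with
  | base =>
    intro hlen
    rw [pvScan_base]
    have hw : ((stock.drop lo).take (lo + 1 - lo)).length = 1 := by
      rw [wlen stock lo (lo + 1) hlen]; omega
    refine ⟨le_refl _, by omega, le_refl _, by omega, ?_, ?_⟩
    · simpa using firstMin_of_length_one hw
    · simpa using firstMax_of_length_one hw
  | succ hi hlo ih =>
    intro hlen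
    have hhi : hi < stock.length := by omega
    obtain ⟨ha1, ha2, hb1, hb2, hmin, hmax⟩ := ih (by omega)
    rw [pvScan_succ stock lo hi (by omega)]
    set p := pvScan stock lo hi with hp
    have hget : ∀ (m : Nat) (hm : m < stock.length), PySem.List.pyGetD stock (m : Int) 0 = stock[m] := by
      intro m hm
      rw [PySem.List.pyGetD_natCast, List.getD_eq_getElem stock 0 hm]
    have hwp1 : ((stock.drop lo).take (hi - lo))[p.1 - lo]'(by rw [wlen stock lo hi (by omega)]; omega) = stock[p.1]'(by omega) :=
      wget' stock lo hi p.1 ha1 ha2 (by omega)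
    have hwp2 : ((stock.drop lo).take (hi - lo))[p.2 - lo]'(by rw [wlen stock lo hi (by omega)]; omega) = stock[p.2]'(by omega) :=
      wget' stock lo hi p.2 hb1 hb2 (by omega)
    have hW : (stock.drop lo).take (hi + 1 - lo) = (stock.drop lo).take (hi - lo) ++ [stock[hi]] :=
      w_succ stock lo hi (by omega) hhi
    have hWlen : ((stock.drop lo).take (hi - lo)).length = hi - lo := wlen stock lo hi (by omega)
    rw [hget hi hhi, hget p.1 (by omega), hget p.2 (by omega)]
    have hminA := firstMin_append ((stock.drop lo).take (hi - lo)) (stock[hi]'hhi) (p.1 - lo)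
      (by rw [hWlen]; omega) hmin
    have hmaxA := firstMax_append ((stock.drop lo).take (hi - lo)) (stock[hi]'hhi) (p.2 - lo)
      (by rw [hWlen]; omega) hmax
    rw [hwp1] at hminA
    rw [hwp2] at hmaxA
    refine ⟨?_, ?_, ?_, ?_, ?_, ?_⟩
    · dsimp only; split_ifs <;> omega
    · dsimp only; split_ifs <;> omega
    · dsimp only; split_ifs <;> omega
    · dsimp only; split_ifs <;> omega
    · dsimp only
      rw [hW]
      by_cases hc : stock[hi]'hhi < stock[p.1]'(by omega)
      · rw [if_pos hc] at hminA ⊢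
        rw [hWlen] at hminA
        exact hminA
      · rw [if_neg hc] at hminA ⊢
        exact hminA
    · dsimp only
      rw [hW]
      by_cases hc : stock[hi]'hhi > stock[p.2]'(by omega)
      · rw [if_pos hc] at hmaxA ⊢
        rw [hWlen] at hmaxA
        exact hmaxA
      · rw [if_neg hc] at hmaxA ⊢
        exact hmaxA

theorem stock_profit_small {w : List Int} (h : w.length ≤ 1) : stock_profit w = 0 := by
  rw [stock_profit]
  rw [if_neg (by omega)]

-- main induction: the window loop of B computes A on the window
theorem pvLoop_eq (stock : List Int) : ∀ n lo hi, hi - lo ≤ n → hi ≤ stock.length →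
    pvLoop stock lo hi = stock_profit ((stock.drop lo).take (hi - lo)) := by
  intro n
  induction n with
  | zero =>
    intro lo hi h1 h2
    rw [pvLoop, dif_neg (by omega), stock_profit_small (by rw [wlen stock lo hi h2]; omega)]
  | succ n ih =>
    intro lo hi h1 h2
    by_cases hbig : hi - lo > 1
    · have hlo : lo < hi := by omega
      obtain ⟨ha1, ha2, hb1, hb2, hmin, hmax⟩ := pvScan_spec stock lo hi (by omega) h2
      rw [pvLoop, dif_pos hbig]
      set p := pvScan stock lo hi with hp
      set w := (stock.drop lo).take (hi - lo) with hwdef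
      have hWlen : w.length = hi - lo := wlen stock lo hi h2
      have hwne : w ≠ [] := by
        intro hnil; rw [hnil] at hWlen; simp at hWlen; omega
      have haA : (PySem.List.index? w ((PySem.List.min? w (fun x => x)).getD 0)).getD 0 = p.1 - lo :=
        firstMin_unique (aIdx_firstMin hwne) hmin
      have hbA : (PySem.List.index? w ((PySem.List.max? w (fun x => x)).getD 0)).getD 0 = p.2 - lo :=
        firstMax_unique (aIdx_firstMax hwne) hmax
      conv_rhs => rw [stock_profit]
      rw [haA, hbA, if_pos (show w.length > 1 by omega)]
      have hget : ∀ (m : Nat) (hm : m < stock.length), PySem.List.pyGetD stock (m : Int) 0 = stock[m] := by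
        intro m hm
        rw [PySem.List.pyGetD_natCast, List.getD_eq_getElem stock 0 hm]
      have hgetw : ∀ (m : Nat) (hm : m < w.length), PySem.List.pyGetD w (m : Int) 0 = w[m] := by
        intro m hm
        rw [PySem.List.pyGetD_natCast, List.getD_eq_getElem w 0 hm]
      by_cases hab : p.1 ≤ p.2
      · rw [if_pos hab, if_neg (show ¬(p.2 - lo < p.1 - lo) by omega)]
        rw [hget p.1 (by omega), hget p.2 (by omega),
            hgetw (p.1 - lo) (by omega), hgetw (p.2 - lo) (by omega)]
        have e1 : w[p.1 - lo]'(by omega) = stock[p.1]'(by omega) :=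
          wget' stock lo hi p.1 ha1 ha2 h2
        have e2 : w[p.2 - lo]'(by omega) = stock[p.2]'(by omega) :=
          wget' stock lo hi p.2 hb1 hb2 h2
        rw [e1, e2]
      · rw [if_neg hab, if_pos (show p.2 - lo < p.1 - lo by omega)]
        by_cases hlast : p.1 = hi - 1
        · rw [dif_pos hlast, if_pos (show w.length - 1 = p.1 - lo by omega)]
          rw [PySem.List.slice_to_natCast]
          have hwt : w.take (p.1 - lo) = (stock.drop lo).take (p.1 - lo) := by
            rw [hwdef, List.take_take, min_eq_left (by omega)]
          rw [hwt, ih lo p.1 (by omega) (by omega)]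
        · rw [dif_neg hlast, if_neg (show ¬(w.length - 1 = p.1 - lo) by omega)]
          have hcast : ((p.2 - lo : Nat) : Int) + 1 = ((p.2 - lo + 1 : Nat) : Int) := by push_cast; ring
          rw [hcast, PySem.List.slice_from_natCast]
          have hwd : w.drop (p.2 - lo + 1) = (stock.drop (p.2 + 1)).take (hi - (p.2 + 1)) := by
            rw [hwdef, List.drop_take, List.drop_drop]
            have e1 : hi - lo - (p.2 - lo + 1) = hi - (p.2 + 1) := by omega
            have e2 : lo + (p.2 - lo + 1) = p.2 + 1 := by omega
            rw [e1, e2]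
          rw [hwd, ih (p.2 + 1) hi (by omega) h2]
    · rw [pvLoop, dif_neg hbig, stock_profit_small (by rw [wlen stock lo hi h2]; omega)]

-- ===== VERDICT (by name: the statement is the Claim_ definition above) =====
theorem stock_profit_spec : Claim_equal_stock_profit := by
  intro stock _ _
  unfold Spec_stock_profit stock_profit_alt
  have := pvLoop_eq stock stock.length 0 stock.length (by omega) (le_refl _)
  simp only [Nat.sub_zero, List.drop_zero, List.take_length] at this
  exact this.symm
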